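-- pv_equiv track=rewrite | github.com/hwang018/recommenders_pytorch | models/encoder.py | create_nn_structure
-- ===== SOURCE A (Python) =====
-- def create_nn_structure(L):
--     max_ind = len(L)-1
--     layers = []
--     for i,v in enumerate(L):
--         if i < max_ind:
--             #still have i+1 available, create layer tuple
--             layer = [v,L[i+1]]
--             layers.append(layer)
--     #then inverse the layers for decoder size
--     encoder_layers = layers[:]
--     for l in encoder_layers[::-1]:
--         decoder_layer = l[::-1]
--         layers.append(decoder_layer)
--     return layers
-- ===== SOURCE B (Python) =====
-- def create_nn_structure(L):
--     # Walk the palindromic value path (L then its reflection without the last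
--     # element) and emit every adjacent pair as a list.
--     path = L + L[:-1][::-1]
--     return [list(p) for p in zip(path, path[1:])]
-- ===== Notes on version B (the rewrite author's own statement) =====
-- stated objective: idiomatic
-- what changed: Instead of building encoder pairs in an indexed loop and then appending each pair reversed in a second reverse pass, B builds the palindromic value path L + L[:-1][::-1] once and emits all adjacent pairs with a single zip over the path.
import Mathlib
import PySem

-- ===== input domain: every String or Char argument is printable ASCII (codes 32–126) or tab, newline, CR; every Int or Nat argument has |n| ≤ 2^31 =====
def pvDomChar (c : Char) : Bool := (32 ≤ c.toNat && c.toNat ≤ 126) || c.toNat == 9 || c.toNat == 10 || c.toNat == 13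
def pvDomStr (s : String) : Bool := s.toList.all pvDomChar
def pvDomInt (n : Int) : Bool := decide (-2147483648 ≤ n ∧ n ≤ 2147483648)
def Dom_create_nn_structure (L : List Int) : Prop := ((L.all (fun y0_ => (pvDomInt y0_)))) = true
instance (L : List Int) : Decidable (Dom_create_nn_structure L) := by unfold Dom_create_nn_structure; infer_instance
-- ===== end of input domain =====

-- B replaces A's indexed encoder loop + second reversing pass by one zip of adjacent
-- pairs over the palindromic value path L + L[:-1][::-1] (idiomatic; same cost).

-- ===== PORT A =====
def create_nn_structure (L : List Int) : List (List Int) :=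
  let max_ind : Int := (L.length : Int) - 1
  -- for i,v in enumerate(L): if i < max_ind: layers.append([v, L[i+1]])
  -- (the guard keeps i+1 in range, so pyGetD's default 0 is never used)
  let layers := (PySem.List.enumerate L).foldl
    (fun acc p =>
      if p.1 < max_ind then acc ++ [[p.2, PySem.List.pyGetD L (p.1 + 1) 0]] else acc) []
  -- encoder_layers = layers[:]
  let encoder_layers := PySem.List.slice layers none none
  -- for l in encoder_layers[::-1]: layers.append(l[::-1])
  ((PySem.List.slice? encoder_layers none none (-1)).getD []).foldl
    (fun acc l => acc ++ [(PySem.List.slice? l none none (-1)).getD []]) layers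

-- ===== PORT B =====
def create_nn_structure_alt (L : List Int) : List (List Int) :=
  -- path = L + L[:-1][::-1]
  let path := L ++ (PySem.List.slice? (PySem.List.slice L none (some (-1))) none none (-1)).getD []
  -- [list(p) for p in zip(path, path[1:])]   (list(p) of a 2-tuple = [p.1, p.2])
  (path.zip (PySem.List.slice path (some 1) none)).map (fun p => [p.1, p.2])

-- ===== PRECONDITION & SPEC =====
def Spec_create_nn_structure (L : List Int) (out : List (List Int)) : Prop := out = create_nn_structure_alt L
instance (L : List Int) (out : List (List Int)) : Decidable (Spec_create_nn_structure L out) := by unfold Spec_create_nn_structure; infer_instance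

-- ===== CLAIM (what is proved, stated in full; the proofs are below) =====
def Claim_equal_create_nn_structure : Prop := ∀ (L : List Int), Dom_create_nn_structure L → Spec_create_nn_structure L (create_nn_structure L)

-- ===== LEMMAS AND PROOFS =====

/-- The list of adjacent pairs of a list — the common value both ports reduce to. -/
def pvPairs : List Int → List (List Int)
  | a :: b :: t => [a, b] :: pvPairs (b :: t)
  | _ => []

theorem pvPairs_zip_tail : ∀ (xs : List Int),
    (xs.zip xs.tail).map (fun p => [p.1, p.2]) = pvPairs xs
  | [] => rfl
  | [_] => rfl
  | a :: b :: t => by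
    simp only [List.tail_cons, List.zip_cons_cons, List.map_cons, pvPairs]
    exact congrArg _ (pvPairs_zip_tail (b :: t))

theorem pvPairs_append_cons : ∀ (xs : List Int) (y : Int) (ys : List Int),
    pvPairs (xs ++ y :: ys) = pvPairs (xs ++ [y]) ++ pvPairs (y :: ys)
  | [], y, ys => by simp [pvPairs]
  | [x], y, ys => by simp [pvPairs]
  | x :: x2 :: xs, y, ys => by
    have ih := pvPairs_append_cons (x2 :: xs) y ys
    simp only [List.cons_append, pvPairs] at ih ⊢
    rw [ih]

theorem pvPairs_snoc : ∀ (xs : List Int) (h : xs ≠ []) (a : Int),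
    pvPairs (xs ++ [a]) = pvPairs xs ++ [[xs.getLast h, a]]
  | [], h, _ => absurd rfl h
  | [x], _, a => by simp [pvPairs]
  | x :: x2 :: xs, _, a => by
    have ih := pvPairs_snoc (x2 :: xs) (by simp) a
    simp only [List.cons_append, pvPairs] at ih ⊢
    rw [ih]
    simp [List.getLast]

theorem pvPairs_reverse : ∀ (xs : List Int),
    pvPairs xs.reverse = (pvPairs xs).reverse.map List.reverse
  | [] => rfl
  | [_] => rfl
  | a :: b :: t => by
    have ih := pvPairs_reverse (b :: t)
    have hne : (b :: t).reverse ≠ [] := by simp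
    have hlast : ((b :: t).reverse).getLast hne = b := by
      simp
    calc pvPairs (a :: b :: t).reverse
        = pvPairs ((b :: t).reverse ++ [a]) := by rw [List.reverse_cons]
      _ = pvPairs (b :: t).reverse ++ [[b, a]] := by rw [pvPairs_snoc _ hne a, hlast]
      _ = (pvPairs (b :: t)).reverse.map List.reverse ++ [[b, a]] := by rw [ih]
      _ = (pvPairs (a :: b :: t)).reverse.map List.reverse := by
            simp [pvPairs]

/-- The palindromic path's adjacent pairs are the forward pairs followed by the
    reversed pairs in reverse order. -/
theorem pvPairs_path : ∀ (L : List Int),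
    pvPairs (L ++ L.dropLast.reverse) = pvPairs L ++ (pvPairs L).reverse.map List.reverse
  | [] => rfl
  | [_] => rfl
  | a :: b :: t => by
    set L := a :: b :: t with hL
    have hne : L ≠ [] := by simp [hL]
    have hsplit : L = L.dropLast ++ [L.getLast hne] := (List.dropLast_append_getLast hne).symm
    have hrev : L.reverse = L.getLast hne :: L.dropLast.reverse := by
      conv_lhs => rw [hsplit]
      simp
    have h1 : L ++ L.dropLast.reverse = L.dropLast ++ (L.getLast hne :: L.dropLast.reverse) := by
      conv_lhs => rw [hsplit]
      simp
    rw [h1, pvPairs_append_cons, ← hrev, ← hsplit, pvPairs_reverse]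

/-- A's first loop builds exactly the adjacent pairs, generalized over a split of L. -/
theorem fold_enum_pairs (full : List Int) : ∀ (suf pre : List Int) (acc : List (List Int)),
    full = pre ++ suf →
    (PySem.List.enumerate suf (pre.length : Int)).foldl
      (fun acc p =>
        if p.1 < (full.length : Int) - 1 then
          acc ++ [[p.2, PySem.List.pyGetD full (p.1 + 1) 0]] else acc) acc
    = acc ++ pvPairs suf
  | [], _, acc, _ => by simp [PySem.List.enumerate_nil, pvPairs]
  | [x], pre, acc, hfull => by
    have hlen : full.length = pre.length + 1 := by simp [hfull]
    have hcond : ¬ ((pre.length : Int) < (full.length : Int) - 1) := by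
      rw [hlen]; push_cast; omega
    simp [PySem.List.enumerate_cons, PySem.List.enumerate_nil, hcond, pvPairs]
  | x :: y :: t, pre, acc, hfull => by
    have hlen : full.length = pre.length + (t.length + 2) := by simp [hfull]
    have hcond : (pre.length : Int) < (full.length : Int) - 1 := by
      rw [hlen]; push_cast; omega
    have hget : PySem.List.pyGetD full ((pre.length : Int) + 1) 0 = y := by
      have : ((pre.length : Int) + 1) = (((pre ++ [x]).length : Nat) : Int) := by
        simp
      rw [this, PySem.List.pyGetD_natCast]
      have : full = (pre ++ [x]) ++ y :: t := by simp [hfull]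
      rw [this]
      rw [List.getD_eq_getElem?_getD, List.getElem?_append_right (by simp)]
      simp
    have ih := fold_enum_pairs full (y :: t) (pre ++ [x]) (acc ++ [[x, y]])
      (by simp [hfull])
    have hst : ((pre ++ [x]).length : Int) = (pre.length : Int) + 1 := by simp
    rw [PySem.List.enumerate_cons]
    simp only [List.foldl_cons, hcond, if_pos, hget]
    rw [← hst] at *
    rw [ih]
    simp [pvPairs]

theorem create_nn_structure_eq_pairs (L : List Int) :
    create_nn_structure L = pvPairs L ++ (pvPairs L).reverse.map List.reverse := by
  unfold create_nn_structure
  have h1 := fold_enum_pairs L L [] [] (by simp)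
  simp only [List.length_nil, Nat.cast_zero] at h1
  simp only [h1, List.nil_append, PySem.List.slice_none_none,
    PySem.List.slice?_none_none_neg_one, Option.getD_some]
  rw [PySem.List.foldl_append_singleton_eq_map]

theorem create_nn_structure_alt_eq_pairs (L : List Int) :
    create_nn_structure_alt L = pvPairs (L ++ L.dropLast.reverse) := by
  unfold create_nn_structure_alt
  simp only [PySem.List.slice_to_neg_one, PySem.List.slice?_none_none_neg_one,
    Option.getD_some, PySem.List.slice_from_one]
  exact pvPairs_zip_tail _

-- ===== VERDICT (by name: the statement is the Claim_ definition above) =====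
theorem create_nn_structure_spec : Claim_equal_create_nn_structure := by
  intro L _
  show create_nn_structure L = create_nn_structure_alt L
  rw [create_nn_structure_eq_pairs, create_nn_structure_alt_eq_pairs, pvPairs_path]
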